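-- pv_equiv track=rewrite | github.com/onastation/cs_labs | security_lab1/task2.py | coincidence_estimation
-- ===== SOURCE A (Python) =====
-- def coincidence_estimation(cipher):
--     coincidences = {}
--     for i in range(1, len(cipher)):
--         shifted_ciphertext = cipher[-i:] + cipher[:-i]
--         coincidences[i] = sum(list(
--             map(lambda x: x[0] == x[1], zip(cipher, shifted_ciphertext))
--         ))
--
--     return coincidences
-- ===== SOURCE B (Python) =====
-- def coincidence_estimation(cipher):
--     n = len(cipher)
--     positions = {}
--     for j, ch in enumerate(cipher):
--         positions.setdefault(ch, []).append(j)
--     counts = [0] * n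
--     for group in positions.values():
--         for p in group:
--             for q in group:
--                 counts[(p - q) % n] += 1
--     return {i: counts[i] for i in range(1, n)}
-- ===== Notes on version B (the rewrite author's own statement) =====
-- stated objective: faster
-- what changed: Instead of building a rotated copy of the whole string and zip-comparing it for every shift, B groups positions by character once and bins the circular position differences of each same-character pair into one counts table, so only same-character pairs are ever touched.
import Mathlib
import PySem

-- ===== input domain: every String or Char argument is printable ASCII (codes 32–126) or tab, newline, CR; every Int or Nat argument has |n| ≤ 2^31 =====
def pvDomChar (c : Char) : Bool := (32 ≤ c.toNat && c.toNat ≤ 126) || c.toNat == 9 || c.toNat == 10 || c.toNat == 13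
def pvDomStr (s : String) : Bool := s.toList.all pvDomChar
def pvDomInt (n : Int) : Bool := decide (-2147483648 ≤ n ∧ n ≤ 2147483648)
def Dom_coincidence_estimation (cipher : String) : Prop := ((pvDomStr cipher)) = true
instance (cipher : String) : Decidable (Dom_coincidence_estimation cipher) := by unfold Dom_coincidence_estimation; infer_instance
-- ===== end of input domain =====

-- B replaces A's per-shift rotated string + zip comparison by one pass that groups positions
-- by character and bins circular position differences of same-character pairs into a counts table.

-- ===== PORT A =====
-- sum(list(map(lambda x: x[0] == x[1], zip(...)))) sums booleans as ints: ported as a 0/1 map summed.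
def coincidence_estimation (cipher : String) : List (Int × Int) :=
  let cs := cipher.toList
  let n : Int := PySem.Str.len cipher
  ((PySem.List.pyRange 1 n 1).foldl (fun d i =>
      let shifted := PySem.List.slice cs (some (-i)) none ++ PySem.List.slice cs none (some (-i))
      d.insert i (((cs.zip shifted).map (fun x => if x.1 == x.2 then (1:Int) else 0)).sum))
    PySem.Dict.empty).items

-- ===== PORT B =====
-- positions.setdefault(ch, []).append(j) is Dict.modify ch [] (· ++ [j]);
-- counts[(p-q) % n] += 1 always hits an in-range index ((p-q) % n ∈ [0,n)), so pySetD/pyGetD are exact here.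
def coincidence_estimation_alt (cipher : String) : List (Int × Int) :=
  let cs := cipher.toList
  let n : Int := PySem.Str.len cipher
  let pos := (PySem.List.enumerate cs).foldl
      (fun d x => d.modify x.2 [] (fun l => l ++ [x.1])) PySem.Dict.empty
  let counts := (PySem.Dict.values pos).foldl (fun counts g =>
      g.foldl (fun counts p =>
        g.foldl (fun counts q =>
          let idx := PySem.Int.mod (p - q) n
          PySem.List.pySetD counts idx (PySem.List.pyGetD counts idx 0 + 1)) counts) counts)
    (List.replicate n.toNat (0:Int))
  ((PySem.List.pyRange 1 n 1).foldl (fun d i => d.insert i (PySem.List.pyGetD counts i 0)) PySem.Dict.empty).items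

-- ===== PRECONDITION & SPEC =====
def Spec_coincidence_estimation (cipher : String) (out : List (Int × Int)) : Prop := out = coincidence_estimation_alt cipher
instance (cipher : String) (out : List (Int × Int)) : Decidable (Spec_coincidence_estimation cipher out) := by unfold Spec_coincidence_estimation; infer_instance

-- ===== CLAIM (what is proved, stated in full; the proofs are below) =====
def Claim_equal_coincidence_estimation : Prop := ∀ (cipher : String), Dom_coincidence_estimation cipher → Spec_coincidence_estimation cipher (coincidence_estimation cipher)

-- ===== LEMMAS AND PROOFS =====

-- the circular partner of position j under shift t, and the per-shift coincidence count both programs compute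
def pvIdx (cs : List Char) (t j : Nat) : Nat := (j + (cs.length - t)) % cs.length
def pvSpec (cs : List Char) (t : Nat) : Nat :=
  (List.range cs.length).countP (fun j => cs.getD j 'a' == cs.getD (pvIdx cs t j) 'a')

-- a sum of 0/1 indicators over a list is a countP (Nat-valued version)
theorem pv_sum_ite {α : Type} (L : List α) (p : α → Bool) :
    (L.map (fun c => if p c then (1:Nat) else 0)).sum = L.countP p := by
  induction L with
  | nil => simp
  | cons x t ih => simp [List.countP_cons, ih]; split <;> simp [Nat.add_comm]

theorem pv_enum (xs : List Char) (s : Int) :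
    PySem.List.enumerate xs s = (List.range xs.length).map (fun j => (s + (j:Nat), xs.getD j 'a')) := by
  induction xs generalizing s with
  | nil => simp [PySem.List.enumerate_nil]
  | cons x t ih =>
    rw [PySem.List.enumerate_cons, ih, show (x :: t).length = t.length + 1 from rfl, List.range_succ_eq_map]
    refine List.cons_eq_cons.mpr ⟨by simp, ?_⟩
    rw [List.map_map]
    apply List.map_congr_left; intro j hj
    simp only [Function.comp_apply, List.getD_cons_succ]
    congr 1
    push_cast; ring

theorem pv_repl (n : Nat) (t : Int) : PySem.List.pyGetD (List.replicate n (0:Int)) t 0 = 0 := by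
  simp only [PySem.List.pyGetD, PySem.List.pyGet?, PySem.List.pyIdx?]
  split
  · split
    · simp [List.getElem?_replicate]; split <;> simp
    · simp
  · split
    · simp [List.getElem?_replicate]; split <;> simp
    · simp

theorem pv_countP_zip (l1 l2 : List Char) (p : Char → Char → Bool) (h : l1.length = l2.length) :
    (l1.zip l2).countP (fun x => p x.1 x.2)
      = (List.range l1.length).countP (fun j => p (l1.getD j 'a') (l2.getD j 'a')) := by
  induction l1 generalizing l2 with
  | nil => simp
  | cons x t ih =>
    cases l2 with
    | nil => simp at h
    | cons y u =>
      simp only [List.zip_cons_cons, List.countP_cons, show (x :: t).length = t.length + 1 from rfl,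
        List.range_succ_eq_map, List.countP_map]
      rw [ih u (by simpa using h)]
      simp [Function.comp_def]

theorem pv_getD_rotate (cs : List Char) (m j : Nat) (hj : j < cs.length) :
    (cs.rotate m).getD j 'a' = cs.getD ((j + m) % cs.length) 'a' := by
  have h1 : j < (cs.rotate m).length := by simpa using hj
  have h2 : (j + m) % cs.length < cs.length := Nat.mod_lt _ (by omega)
  rw [List.getD_eq_getElem _ _ h1, List.getD_eq_getElem _ _ h2, List.getElem_rotate]

-- A's per-shift value: the rotated-and-zipped comparison counts the coincidences pvSpec
theorem pv_vA (cs : List Char) (t : Nat) (h1 : 1 ≤ t) (h2 : t < cs.length) :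
    ((cs.zip (PySem.List.slice cs (some (-(t:Int))) none
        ++ PySem.List.slice cs none (some (-(t:Int))))).map
      (fun x => if x.1 == x.2 then (1:Int) else 0)).sum = (pvSpec cs t : Int) := by
  rw [PySem.List.slice_from_neg_natCast cs t (by omega : 0 < t),
      PySem.List.slice_to_neg_natCast cs t (by omega : 0 < t),
      ← List.rotate_eq_drop_append_take (by omega : cs.length - t ≤ cs.length),
      PySem.List.sum_map_ite_one_zero]
  congr 1
  rw [pv_countP_zip _ _ (fun a b => a == b) (by simp)]
  apply List.countP_congr
  intro j hj
  have hj' : j < cs.length := List.mem_range.mp hj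
  rw [pv_getD_rotate cs _ j hj']
  rfl

-- A's items, written as a map over the shifts
theorem pv_A_items (cipher : String) :
    coincidence_estimation cipher
      = (PySem.List.pyRange 1 (cipher.toList.length : Int) 1).map
          (fun i => (i, (pvSpec cipher.toList i.toNat : Int))) := by
  unfold coincidence_estimation
  simp only [PySem.Str.len_eq]
  rw [PySem.Dict.items_foldl_insert_fresh _ (fun i => i)
    (fun i => ((cipher.toList.zip (PySem.List.slice cipher.toList (some (-i)) none
      ++ PySem.List.slice cipher.toList none (some (-i)))).map
        (fun x => if x.1 == x.2 then (1:Int) else 0)).sum) _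
    (by intro a _; exact PySem.Dict.contains_empty a)
    (by simpa using PySem.List.nodup_pyRange_one 1 (cipher.toList.length : Int))]
  show List.map _ _ = _
  apply List.map_congr_left
  intro i hi
  obtain ⟨hi1, hi2⟩ := PySem.List.mem_pyRange_one.mp hi
  have hit : i = ((i.toNat : Nat) : Int) := by omega
  have h1 : 1 ≤ i.toNat := by omega
  have h2 : i.toNat < cipher.toList.length := by omega
  rw [hit, pv_vA _ _ h1 h2]
  congr 2

-- an integer is a given residue mod n exactly when it is n-divisibly far from it
theorem pv_emod_eq_iff (a b n : Int) (hb : 0 ≤ b) (hbn : b < n) : a % n = b ↔ n ∣ (a - b) := by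
  constructor
  · intro h
    refine Int.dvd_of_emod_eq_zero ?_
    rw [Int.sub_emod, h, Int.emod_eq_of_lt hb hbn]; simp
  · intro h
    have : a % n = b % n := Int.emod_eq_emod_iff_emod_sub_eq_zero.mpr (Int.emod_eq_zero_of_dvd h)
    rwa [Int.emod_eq_of_lt hb hbn] at this

-- the circular-difference test of B picks out exactly the partner position pvIdx
theorem pv_mod_iff (n t j jq : Nat) (h1 : 1 ≤ t) (h2 : t < n) (hj : j < n) (hjq : jq < n) :
    (PySem.Int.mod ((j:Int) - (jq:Int)) (n:Int) = (t:Int)) ↔ jq = (j + (n - t)) % n := by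
  have hn : (0:Int) < (n:Int) := by exact_mod_cast (by omega : 0 < n)
  rw [PySem.Int.mod_eq_emod_of_pos hn,
    pv_emod_eq_iff _ _ _ (by positivity) (by exact_mod_cast h2)]
  have hcast : (((j + (n - t)) % n : Nat) : Int) = ((j:Int) + (n:Int) - (t:Int)) % (n:Int) := by
    push_cast [Nat.cast_sub (le_of_lt h2)]
    ring_nf
  constructor
  · intro h
    have h2' : (n:Int) ∣ (((j:Int) + (n:Int) - (t:Int)) - (jq:Int)) := by
      have : ((j:Int) + (n:Int) - (t:Int)) - (jq:Int) = ((j:Int) - (jq:Int) - (t:Int)) + (n:Int) := by ring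
      rw [this]
      exact dvd_add h (dvd_refl _)
    have heq := (pv_emod_eq_iff ((j:Int) + (n:Int) - (t:Int)) (jq:Int) (n:Int) (by positivity) (by exact_mod_cast hjq)).mpr h2'
    have : (((j + (n - t)) % n : Nat) : Int) = (jq:Int) := by rw [hcast, heq]
    exact_mod_cast this.symm
  · intro h
    have hjq' : ((j:Int) + (n:Int) - (t:Int)) % (n:Int) = (jq:Int) := by
      rw [← hcast]
      exact_mod_cast congrArg (fun x => ((x:Nat) : Int)) h.symm
    have hd := (pv_emod_eq_iff _ _ _ (by positivity) (by exact_mod_cast hjq)).mp hjq'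
    have : (j:Int) - (jq:Int) - (t:Int) = (((j:Int) + (n:Int) - (t:Int)) - (jq:Int)) - (n:Int) := by ring
    rw [this]
    exact dvd_sub hd (dvd_refl _)

-- a fold of in-range increments: the final cell t holds its start value plus the number of hits on t
theorem pv_incr_fold (ev : List Int) (counts : List Int)
    (h : ∀ e ∈ ev, 0 ≤ e ∧ e < counts.length) (t : Nat) (ht : t < counts.length) :
    PySem.List.pyGetD (ev.foldl (fun cs e => PySem.List.pySetD cs e (PySem.List.pyGetD cs e 0 + 1)) counts) (t:Int) 0
      = PySem.List.pyGetD counts (t:Int) 0 + ev.count (t:Int) := by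
  induction ev generalizing counts with
  | nil => simp
  | cons e tl ih =>
    obtain ⟨he0, hel⟩ := h e (List.mem_cons_self)
    have hee : e = ((e.toNat : Nat) : Int) := by omega
    have helen : e.toNat < counts.length := by omega
    rw [List.foldl_cons, ih _ (by
      intro x hx
      have := h x (List.mem_cons_of_mem _ hx)
      simpa [PySem.List.length_pySetD] using this) (by simpa [PySem.List.length_pySetD] using ht)]
    rw [List.count_cons]
    rw [hee, PySem.List.pyGetD_pySetD_natCast _ _ _ _ _ helen]
    by_cases hte : t = e.toNat
    · subst hte
      simp [← hee]
      omega
    · simp only [if_neg hte]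
      have : ¬ ((t:Int) == e) := by simp; omega
      simp
      omega

-- partition of a countP over the distinct values of a key
theorem pv_partition {κ β : Type} [BEq κ] [LawfulBEq κ] (L : List κ) (hnd : L.Nodup)
    (l : List β) (key : β → κ) (q : β → Bool) (hcov : ∀ x ∈ l, key x ∈ L) :
    (L.map (fun c => l.countP (fun x => (key x == c) && q x))).sum = l.countP q := by
  induction l with
  | nil => simp
  | cons x tl ih =>
    have hx := hcov x List.mem_cons_self
    simp only [List.countP_cons]
    have hsplit : (L.map (fun c => tl.countP (fun y => (key y == c) && q y)
        + if (key x == c) && q x then 1 else 0)).sum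
        = (L.map (fun c => tl.countP (fun y => (key y == c) && q y))).sum
          + (L.map (fun c => if (key x == c) && q x then 1 else 0)).sum := by
      induction L with
      | nil => simp
      | cons c cs ihL => simp at ihL ⊢; omega
    rw [hsplit, ih (fun y hy => hcov y (List.mem_cons_of_mem _ hy))]
    congr 1
    rw [pv_sum_ite]
    by_cases hq : q x
    · simp only [hq, Bool.and_true]
      have : L.countP (fun c => key x == c) = L.count (key x) := by
        rw [List.count_eq_countP]
        apply List.countP_congr
        intro c _
        simp only [beq_iff_eq]
        exact eq_comm
      rw [this, List.Nodup.count hnd]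
      simp [hx]
    · simp only [Bool.not_eq_true] at hq
      simp [hq]

-- B's grouping loop, re-read as a fold over (character, position) pairs of the indexed string
theorem pv_pos_fold (cs : List Char) :
    (PySem.List.enumerate cs).foldl (fun d x => d.modify x.2 [] (fun l => l ++ [x.1]))
        (PySem.Dict.empty : PySem.Dict Char (List Int))
      = ((List.range cs.length).map (fun j => (cs.getD j 'a', ((j:Nat):Int)))).foldl
          (fun d p => d.modify p.1 [] (fun l => l ++ [p.2])) PySem.Dict.empty := by
  rw [pv_enum cs 0, List.foldl_map, List.foldl_map]
  simp

-- B's dict of positions: getD c [] is the ordered list of positions of c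
theorem pv_pos_getD (cs : List Char) (c : Char) :
    ((PySem.List.enumerate cs).foldl (fun d x => d.modify x.2 [] (fun l => l ++ [x.1]))
        (PySem.Dict.empty : PySem.Dict Char (List Int))).getD c []
      = ((List.range cs.length).filter (fun j => cs.getD j 'a' == c)).map (fun j => ((j:Nat):Int)) := by
  rw [pv_pos_fold, PySem.Dict.getD_foldl_modify_append]
  simp [List.filter_map, List.map_map, Function.comp_def]

theorem pv_pos_keys (cs : List Char) :
    ((PySem.List.enumerate cs).foldl (fun d x => d.modify x.2 [] (fun l => l ++ [x.1]))
        (PySem.Dict.empty : PySem.Dict Char (List Int))).keys = PySem.Set.ofList cs := by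
  rw [pv_pos_fold, PySem.Dict.keys_foldl_modify_key _ (fun p : Char × Int => p.1) []
    (fun _ p v => v ++ [p.2])]
  have : ((List.range cs.length).map (fun j => (cs.getD j 'a', ((j:Nat):Int)))).map (fun p => p.1)
      = cs := by
    rw [List.map_map]
    simp only [Function.comp_def]
    apply List.ext_getElem (by simp)
    intro i h1 h2
    simp [List.getElem?_eq_getElem h2]
  rw [this]
  simp [pysem, PySem.Set.update, PySem.Set.ofList_eq_foldl]

theorem pv_pos_nodup (cs : List Char) :
    ((PySem.List.enumerate cs).foldl (fun d x => d.modify x.2 [] (fun l => l ++ [x.1]))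
        (PySem.Dict.empty : PySem.Dict Char (List Int))).keys.Nodup := by
  rw [pv_pos_fold]
  exact PySem.Dict.nodup_keys_foldl_modify_key _ (fun p : Char × Int => p.1) []
    (fun _ p v => v ++ [p.2]) _ (by simp)

-- among the positions of character c, only the partner pvIdx cs t j can pass the shift test,
-- so one group's pair scan counts exactly the positions of c whose partner also carries c
theorem pv_group_count (cs : List Char) (c : Char) (t : Nat) (h1 : 1 ≤ t) (h2 : t < cs.length) :
    ((((List.range cs.length).filter (fun k => cs.getD k 'a' == c)).map (fun k => ((k:Nat):Int))).flatMap
        (fun p => (((List.range cs.length).filter (fun k => cs.getD k 'a' == c)).map (fun k => ((k:Nat):Int))).map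
          (fun q => PySem.Int.mod (p - q) (cs.length : Int)))).count (t : Int)
      = (List.range cs.length).countP
          (fun j => (cs.getD j 'a' == c) && (cs.getD j 'a' == cs.getD (pvIdx cs t j) 'a')) := by
  set FL := (List.range cs.length).filter (fun k => cs.getD k 'a' == c) with hFL
  have hFLnodup : FL.Nodup := List.nodup_range.filter _
  have hFLmem : ∀ j, j ∈ FL ↔ j < cs.length ∧ cs.getD j 'a' = c := by
    intro j
    rw [hFL, List.mem_filter, List.mem_range]
    simp
  rw [List.count_flatMap, List.map_map]
  have hmapeq : FL.map ((List.count ((t:Nat):Int) ∘ fun p => (FL.map (fun k => ((k:Nat):Int))).map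
          (fun q => PySem.Int.mod (p - q) (cs.length : Int))) ∘ fun k => ((k:Nat):Int))
      = FL.map (fun j => if cs.getD (pvIdx cs t j) 'a' == c then (1:Nat) else 0) := by
    apply List.map_congr_left
    intro j hjmem
    obtain ⟨hj, hjc⟩ := (hFLmem j).mp hjmem
    simp only [Function.comp_apply]
    rw [List.count_eq_countP, List.countP_map, List.countP_map]
    have : FL.countP (fun jq => ((PySem.Int.mod (((j:Nat):Int) - ((jq:Nat):Int)) ((cs.length:Nat):Int)) == ((t:Nat):Int)))
        = FL.countP (fun jq => jq == pvIdx cs t j) := by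
      apply List.countP_congr
      intro jq hjqmem
      obtain ⟨hjq, _⟩ := (hFLmem jq).mp hjqmem
      simp only [beq_iff_eq]
      exact pv_mod_iff cs.length t j jq h1 h2 hj hjq
    simp only [Function.comp_def]
    rw [this, show (fun jq => jq == pvIdx cs t j) = (· == pvIdx cs t j) from rfl,
      ← List.count_eq_countP, List.Nodup.count hFLnodup]
    have hpvlt : pvIdx cs t j < cs.length := Nat.mod_lt _ (by omega)
    simp [hFLmem, hpvlt]
  rw [hmapeq, pv_sum_ite, hFL, List.countP_filter]
  apply List.countP_congr
  intro j _
  simp only [Bool.and_eq_true, beq_iff_eq]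
  exact ⟨fun ⟨ha, hb⟩ => ⟨hb, by rw [hb, ha]⟩, fun ⟨ha, hb⟩ => ⟨by rw [← hb, ha], ha⟩⟩

-- summing the group scans over all distinct characters yields the per-shift coincidence count
theorem pv_ev_count (cs : List Char) (t : Nat) (h1 : 1 ≤ t) (h2 : t < cs.length) :
    ((PySem.Dict.values ((PySem.List.enumerate cs).foldl
          (fun d x => d.modify x.2 [] (fun l => l ++ [x.1])) PySem.Dict.empty)).flatMap
        (fun g => g.flatMap (fun p => g.map (fun q => PySem.Int.mod (p - q) (cs.length : Int))))).count
      (t : Int) = pvSpec cs t := by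
  rw [PySem.Dict.values_eq_map_keys _ (pv_pos_nodup cs) [], pv_pos_keys]
  rw [List.count_flatMap, List.map_map]
  have hmapeq : (PySem.Set.ofList cs).map ((List.count ((t:Nat):Int) ∘ fun g =>
        g.flatMap (fun p => g.map (fun q => PySem.Int.mod (p - q) (cs.length : Int)))) ∘ fun k =>
          ((PySem.List.enumerate cs).foldl (fun d x => d.modify x.2 [] (fun l => l ++ [x.1]))
            (PySem.Dict.empty : PySem.Dict Char (List Int))).getD k [])
      = (PySem.Set.ofList cs).map (fun c => (List.range cs.length).countP
          (fun j => (cs.getD j 'a' == c) && (cs.getD j 'a' == cs.getD (pvIdx cs t j) 'a'))) := by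
    apply List.map_congr_left
    intro c _
    simp only [Function.comp_apply]
    rw [pv_pos_getD, pv_group_count cs c t h1 h2]
  rw [hmapeq, pv_partition (PySem.Set.ofList cs) (PySem.Set.nodup_ofList cs) (List.range cs.length)
    (fun j => cs.getD j 'a') _ (by
      intro j hj
      rw [PySem.Set.mem_ofList]
      show cs.getD j 'a' ∈ cs
      rw [List.getD_eq_getElem _ _ (List.mem_range.mp hj)]
      exact List.getElem_mem _)]
  rfl

-- B's items, written as a map over the shifts
theorem pv_B_items (cipher : String) :
    coincidence_estimation_alt cipher
      = (PySem.List.pyRange 1 (cipher.toList.length : Int) 1).map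
          (fun i => (i, (pvSpec cipher.toList i.toNat : Int))) := by
  unfold coincidence_estimation_alt
  simp only [PySem.Str.len_eq]
  set cs := cipher.toList with hcs
  set pos := (PySem.List.enumerate cs).foldl
      (fun d x => d.modify x.2 [] (fun l => l ++ [x.1]))
      (PySem.Dict.empty : PySem.Dict Char (List Int)) with hpos
  set ev := (PySem.Dict.values pos).flatMap
      (fun g => g.flatMap (fun p => g.map (fun q => PySem.Int.mod (p - q) (cs.length : Int)))) with hev
  have hcounts : (PySem.Dict.values pos).foldl (fun counts g =>
      g.foldl (fun counts p =>
        g.foldl (fun counts q =>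
          let idx := PySem.Int.mod (p - q) (cs.length : Int)
          PySem.List.pySetD counts idx (PySem.List.pyGetD counts idx 0 + 1)) counts) counts)
      (List.replicate (cs.length : Int).toNat (0:Int))
      = ev.foldl (fun c e => PySem.List.pySetD c e (PySem.List.pyGetD c e 0 + 1))
          (List.replicate (cs.length : Int).toNat (0:Int)) := by
    rw [hev, List.foldl_flatMap]
    simp only [List.foldl_flatMap, List.foldl_map]
  rw [hcounts]
  rw [PySem.Dict.items_foldl_insert_fresh _ (fun i => i) _ _
    (by intro a _; exact PySem.Dict.contains_empty a)
    (by simpa using PySem.List.nodup_pyRange_one 1 (cs.length : Int))]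
  show List.map _ _ = _
  apply List.map_congr_left
  intro i hi
  obtain ⟨hi1, hi2⟩ := PySem.List.mem_pyRange_one.mp hi
  have hn : 0 < cs.length := by omega
  have hlen : (List.replicate (cs.length : Int).toNat (0:Int)).length = cs.length := by simp
  have hbound : ∀ e ∈ ev, 0 ≤ e ∧ e < (List.replicate (cs.length : Int).toNat (0:Int)).length := by
    intro e he
    rw [hev] at he
    simp only [List.mem_flatMap, List.mem_map] at he
    obtain ⟨g, _, p, _, q, _, rfl⟩ := he
    rw [hlen]
    exact ⟨PySem.Int.mod_nonneg _ (by exact_mod_cast hn),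
      PySem.Int.mod_lt (p - q) (b := (cs.length : Int)) (by exact_mod_cast hn)⟩
  have hit : i = ((i.toNat : Nat) : Int) := by omega
  rw [hit, pv_incr_fold ev _ hbound i.toNat (by rw [hlen]; omega), pv_repl,
    pv_ev_count cs i.toNat (by omega) (by omega)]
  rw [Int.toNat_natCast]
  simp

-- ===== VERDICT (by name: the statement is the Claim_ definition above) =====
theorem coincidence_estimation_spec : Claim_equal_coincidence_estimation := by
  intro cipher _
  unfold Spec_coincidence_estimation
  rw [pv_A_items, pv_B_items]
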